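-- pv_equiv track=rewrite | github.com/CapnSquirrel/CombinatorialPatternMatching | matching_algorithms.py | create_count
-- ===== SOURCE A (Python) =====
-- def create_count(last_column):
--     symbols = sorted(set(last_column))
--     counts = dict.fromkeys(symbols, 0)
--     count_matrix = [dict.fromkeys(symbols, 0)]
--     for char in last_column:
--         counts[char] += 1
--         count_matrix.append(counts.copy())
--
--     return count_matrix
-- ===== SOURCE B (Python) =====
-- def create_count(last_column):
--     symbols = sorted(set(last_column))
--     n = len(last_column)
--     cols = {}
--     for s in symbols:
--         col = [0]
--         for ch in last_column:
--             col.append(col[-1] + (1 if ch == s else 0))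
--         cols[s] = col
--     return [{s: cols[s][i] for s in symbols} for i in range(n + 1)]
-- ===== Notes on version B (the rewrite author's own statement) =====
-- stated objective: alternative
-- what changed: B computes the count matrix column-first: one prefix-count list per symbol built by its own pass over last_column, then the rows are produced by transposing these columns, instead of A's single pass that snapshots one mutating counts dict after every character.
import Mathlib
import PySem

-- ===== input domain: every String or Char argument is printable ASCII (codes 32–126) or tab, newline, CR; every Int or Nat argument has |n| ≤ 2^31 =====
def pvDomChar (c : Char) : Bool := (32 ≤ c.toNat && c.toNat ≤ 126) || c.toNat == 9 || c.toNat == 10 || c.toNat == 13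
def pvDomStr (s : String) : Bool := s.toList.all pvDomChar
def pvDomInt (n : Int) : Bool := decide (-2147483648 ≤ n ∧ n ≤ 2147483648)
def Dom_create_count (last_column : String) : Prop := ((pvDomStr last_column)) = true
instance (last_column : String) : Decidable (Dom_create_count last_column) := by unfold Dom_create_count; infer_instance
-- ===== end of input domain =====

-- B builds the matrix column-first (one prefix-count list per symbol, then transposes) instead of
-- A's row-first pass snapshotting a mutating counts dict; alternative decomposition, same cost.

-- ===== PORT A =====
def create_count (last_column : String) : List (List (String × Int)) :=
  let symbols : List Char :=
    PySem.List.sorted (PySem.Set.ofList last_column.toList) (fun x => x) false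
  let counts : PySem.Dict String Int :=
    List.foldl (fun d c => d.insert (String.mk [c]) 0) PySem.Dict.empty symbols
  let st :=
    List.foldl
      (fun (st : PySem.Dict String Int × List (List (String × Int))) ch =>
        let counts' := st.1.modify (String.mk [ch]) 0 (fun x => x + 1)
        (counts', st.2 ++ [counts'.items]))
      (counts, [counts.items]) last_column.toList
  st.2

-- ===== PORT B =====
-- B-side helper: the inner loop of Source B building one symbol's prefix-count column
def colOf (l : List Char) (s : Char) : List Int :=
  List.foldl
    (fun col ch => col ++ [PySem.List.pyGetD col (-1) 0 + (if ch = s then 1 else 0)])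
    [0] l

def create_count_alt (last_column : String) : List (List (String × Int)) :=
  let l := last_column.toList
  let symbols : List Char := PySem.List.sorted (PySem.Set.ofList l) (fun x => x) false
  let n : Int := (l.length : Int)
  let cols : PySem.Dict Char (List Int) :=
    List.foldl (fun d s => d.insert s (colOf l s)) PySem.Dict.empty symbols
  (PySem.List.pyRange 0 (n + 1) 1).map (fun i =>
    symbols.map (fun s => (String.mk [s], PySem.List.pyGetD (cols.getD s []) i 0)))

-- ===== PRECONDITION & SPEC =====
def Spec_create_count (last_column : String) (out : List (List (String × Int))) : Prop := out = create_count_alt last_column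
instance (last_column : String) (out : List (List (String × Int))) : Decidable (Spec_create_count last_column out) := by unfold Spec_create_count; infer_instance

-- ===== CLAIM (what is proved, stated in full; the proofs are below) =====
def Claim_equal_create_count : Prop := ∀ (last_column : String), Dom_create_count last_column → Spec_create_count last_column (create_count last_column)

-- ===== LEMMAS AND PROOFS =====

-- the common value both programs compute: row i maps each symbol to its count in the first i chars
def pvRows (l symbols : List Char) : List (List (String × Int)) :=
  (List.range (l.length + 1)).map (fun i =>
    symbols.map (fun s => (String.mk [s], ((l.take i).count s : Int))))

theorem pvMkInj : Function.Injective (fun c => String.mk [c]) := by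
  intro a b h
  have h2 : ([a] : List Char) = [b] := String.ofList_inj.mp h
  simpa using h2

theorem pvSymbols_nodup (l : List Char) :
    (PySem.List.sorted (PySem.Set.ofList l) (fun x => x) false).Nodup :=
  ((PySem.List.sorted_perm _ _ _).nodup_iff).mpr (PySem.Set.nodup_ofList l)

theorem pvMem_symbols (l : List Char) (c : Char) :
    c ∈ PySem.List.sorted (PySem.Set.ofList l) (fun x => x) false ↔ c ∈ l := by
  rw [PySem.List.mem_sorted, PySem.Set.mem_ofList]

-- B's column for symbol s is the list of prefix counts of s
theorem pvColOf_spec (l : List Char) (s : Char) (p : List Char) :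
    List.foldl
      (fun col ch => col ++ [PySem.List.pyGetD col (-1) 0 + (if ch = s then 1 else 0)])
      ((List.range (p.length + 1)).map (fun j => ((p.take j).count s : Int))) l
    = (List.range ((p ++ l).length + 1)).map (fun j => (((p ++ l).take j).count s : Int)) := by
  induction l generalizing p with
  | nil => simp
  | cons c t ih =>
    rw [List.foldl_cons]
    have hlast : PySem.List.pyGetD
        ((List.range (p.length + 1)).map (fun j => ((p.take j).count s : Int))) (-1) 0
        = (p.count s : Int) := by
      rw [List.range_succ, List.map_append, List.map_cons, List.map_nil,
        PySem.List.pyGetD_neg_one_append_singleton]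
      simp
    have hacc : ((List.range (p.length + 1)).map (fun j => ((p.take j).count s : Int))) ++
        [PySem.List.pyGetD
          ((List.range (p.length + 1)).map (fun j => ((p.take j).count s : Int))) (-1) 0
          + (if c = s then 1 else 0)]
        = (List.range ((p ++ [c]).length + 1)).map
            (fun j => (((p ++ [c]).take j).count s : Int)) := by
      rw [hlast]
      have hlen : (p ++ [c]).length + 1 = (p.length + 1) + 1 := by simp
      rw [hlen, List.range_succ (n := p.length + 1), List.map_append, List.map_cons, List.map_nil]
      congr 1
      · apply List.map_congr_left
        intro j hj
        have hle : j ≤ p.length := by have := List.mem_range.mp hj; omega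
        rw [List.take_append_of_le_length hle]
      · have ht : (p ++ [c]).take (p.length + 1) = p ++ [c] := by
          apply List.take_of_length_le; simp
        rw [ht]
        by_cases h : c = s <;> simp [h, List.count_append]
    rw [hacc, ih (p ++ [c])]
    simp

theorem pvColOf_eq (l : List Char) (s : Char) :
    colOf l s = (List.range (l.length + 1)).map (fun j => ((l.take j).count s : Int)) := by
  have := pvColOf_spec l s []
  simpa [colOf] using this

-- Set.update does nothing when every element is already present
theorem pvSet_update_of_subset {α : Type} [BEq α] [LawfulBEq α] (s : PySem.Set α) (xs : List α)
    (h : ∀ x ∈ xs, x ∈ s) : PySem.Set.update s xs = s := by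
  induction xs generalizing s with
  | nil => rfl
  | cons x t ih =>
    have hx : PySem.Set.add s x = s := by
      simp [PySem.Set.add, PySem.Set.contains, h x (by simp)]
    show PySem.Set.update (PySem.Set.add s x) t = s
    rw [hx]
    exact ih s (fun y hy => h y (by simp [hy]))

-- A's counts dict after processing prefix p, as an items list
theorem pvCounts_items (symbols p : List Char) (hnd : symbols.Nodup)
    (hsub : ∀ c ∈ p, c ∈ symbols) :
    (List.foldl (fun d ch => d.modify (String.mk [ch]) 0 (fun x => x + 1))
      (List.foldl (fun d c => d.insert (String.mk [c]) 0)
        (PySem.Dict.empty : PySem.Dict String Int) symbols) p).items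
    = symbols.map (fun c => (String.mk [c], (p.count c : Int))) := by
  have hndmk : (symbols.map (fun c => String.mk [c])).Nodup := hnd.map pvMkInj
  have hD0items :
      (List.foldl (fun d c => d.insert (String.mk [c]) 0)
        (PySem.Dict.empty : PySem.Dict String Int) symbols).items
      = symbols.map (fun c => (String.mk [c], (0 : Int))) := by
    have := PySem.Dict.items_foldl_insert_fresh symbols (fun c => String.mk [c])
      (fun _ => (0 : Int)) PySem.Dict.empty (fun a _ => by simp) hndmk
    simpa using this
  have hD0keys :
      (List.foldl (fun d c => d.insert (String.mk [c]) 0)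
        (PySem.Dict.empty : PySem.Dict String Int) symbols).keys
      = symbols.map (fun c => String.mk [c]) := by
    simp only [PySem.Dict.keys, hD0items, List.map_map]
    rfl
  have hD0nd :
      (List.foldl (fun d c => d.insert (String.mk [c]) 0)
        (PySem.Dict.empty : PySem.Dict String Int) symbols).keys.Nodup := by
    rw [hD0keys]; exact hndmk
  rw [show (List.foldl (fun d ch => d.modify (String.mk [ch]) 0 (fun x => x + 1))
      (List.foldl (fun d c => d.insert (String.mk [c]) 0)
        (PySem.Dict.empty : PySem.Dict String Int) symbols) p)
      = List.foldl (fun d x => d.modify x 0 (fun v => v + 1))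
        (List.foldl (fun d c => d.insert (String.mk [c]) 0)
          (PySem.Dict.empty : PySem.Dict String Int) symbols)
        (p.map (fun c => String.mk [c])) by rw [List.foldl_map]]
  set D0 := List.foldl (fun d c => d.insert (String.mk [c]) 0)
    (PySem.Dict.empty : PySem.Dict String Int) symbols with hD0
  set D := List.foldl (fun d x => d.modify x 0 (fun v => v + 1)) D0
    (p.map (fun c => String.mk [c])) with hD
  have hkeys : D.keys = D0.keys := by
    rw [hD]
    have := PySem.Dict.keys_foldl_modify_key (p.map (fun c => String.mk [c])) (fun x => x)
      (0 : Int) (fun _ _ => (fun v => v + 1)) D0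
    simp only [List.map_id'] at this
    rw [this]
    apply pvSet_update_of_subset
    intro x hx
    rcases List.mem_map.mp hx with ⟨c, hc, rfl⟩
    rw [hD0keys]
    exact List.mem_map_of_mem (hsub c hc)
  have hknd : D.keys.Nodup := by rw [hkeys]; exact hD0nd
  have hgetD : ∀ c ∈ symbols, D.getD (String.mk [c]) 0 = (p.count c : Int) := by
    intro c hc
    have h0 : D0.getD (String.mk [c]) 0 = 0 := by
      refine PySem.Dict.getD_of_mem_items _ ?_ hD0nd 0
      rw [hD0items]
      exact List.mem_map_of_mem hc
    rw [hD, PySem.Dict.getD_foldl_modify_add_one, h0,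
      List.count_map_of_injective p (fun c => String.mk [c]) pvMkInj]
    simp
  rw [PySem.Dict.items_eq_map_keys D hknd 0, hkeys, hD0keys, List.map_map]
  apply List.map_congr_left
  intro c hc
  simp [hgetD c hc]

-- A's main loop, unpaired: the dict fold and the snapshot rows
theorem pvA_loop (l : List Char) (d : PySem.Dict String Int) (m : List (List (String × Int))) :
    List.foldl
      (fun (st : PySem.Dict String Int × List (List (String × Int))) ch =>
        let counts' := st.1.modify (String.mk [ch]) 0 (fun x => x + 1)
        (counts', st.2 ++ [counts'.items])) (d, m) l
    = (List.foldl (fun d ch => d.modify (String.mk [ch]) 0 (fun x => x + 1)) d l,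
       m ++ (List.range l.length).map (fun j =>
         (List.foldl (fun d ch => d.modify (String.mk [ch]) 0 (fun x => x + 1)) d
           (l.take (j + 1))).items)) := by
  induction l generalizing d m with
  | nil => simp
  | cons c t ih =>
    rw [List.foldl_cons, List.foldl_cons]
    rw [ih]
    congr 1
    simp only [List.length_cons, List.range_succ_eq_map, List.map_cons, List.map_map,
      List.take_succ_cons, List.foldl_cons, List.take_zero, List.foldl_nil]
    rw [List.append_assoc]
    rfl

theorem pvA_eq (last_column : String) : create_count last_column = pvRows last_column.toList
    (PySem.List.sorted (PySem.Set.ofList last_column.toList) (fun x => x) false) := by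
  unfold create_count pvRows
  set l := last_column.toList with hl
  set symbols := PySem.List.sorted (PySem.Set.ofList l) (fun x => x) false with hsym
  simp only [pvA_loop]
  have hrow : ∀ p : List Char, (∀ c ∈ p, c ∈ l) →
      (List.foldl (fun d ch => d.modify (String.mk [ch]) 0 (fun x => x + 1))
        (List.foldl (fun d c => d.insert (String.mk [c]) 0)
          (PySem.Dict.empty : PySem.Dict String Int) symbols) p).items
      = symbols.map (fun c => (String.mk [c], (p.count c : Int))) := by
    intro p hp
    exact pvCounts_items symbols p (pvSymbols_nodup l)
      (fun c hc => (pvMem_symbols l c).mpr (hp c hc))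
  have h0 := hrow [] (by simp)
  simp only [List.foldl_nil] at h0
  rw [h0]
  rw [List.range_succ_eq_map, List.map_cons, List.map_map, ← List.singleton_append]
  refine congrArg₂ (· ++ ·) rfl ?_
  apply List.map_congr_left
  intro j hj
  exact hrow (l.take (j + 1)) (fun c hc => List.mem_of_mem_take hc)

theorem pvB_eq (last_column : String) : create_count_alt last_column = pvRows last_column.toList
    (PySem.List.sorted (PySem.Set.ofList last_column.toList) (fun x => x) false) := by
  simp only [create_count_alt, pvRows]
  set l := last_column.toList with hl
  set symbols := PySem.List.sorted (PySem.Set.ofList l) (fun x => x) false with hsym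
  set cols := List.foldl (fun d s => d.insert s (colOf l s))
    (PySem.Dict.empty : PySem.Dict Char (List Int)) symbols with hc
  have hnd : symbols.Nodup := pvSymbols_nodup l
  have hcols : cols.items = symbols.map (fun s => (s, colOf l s)) := by
    rw [hc]
    have := PySem.Dict.items_foldl_insert_fresh symbols (fun s => s) (fun s => colOf l s)
      PySem.Dict.empty (fun a _ => by simp) (by simpa using hnd)
    simpa using this
  have hknd : cols.keys.Nodup := by
    simp only [PySem.Dict.keys, hcols, List.map_map]
    exact hnd.map (fun a b h => h)
  have hgetD : ∀ s ∈ symbols, cols.getD s [] = colOf l s := by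
    intro s hs
    refine PySem.Dict.getD_of_mem_items _ ?_ hknd []
    rw [hcols]
    exact List.mem_map_of_mem hs
  have hrange : PySem.List.pyRange 0 ((l.length : Int) + 1) 1
      = (List.range (l.length + 1)).map (fun k : Nat => (k : Int)) := by
    have := PySem.List.pyRange_zero_natCast (l.length + 1)
    push_cast at this ⊢
    rw [this]
  rw [hrange, List.map_map]
  apply List.map_congr_left
  intro i hi
  have hi' : i < l.length + 1 := List.mem_range.mp hi
  simp only [Function.comp]
  apply List.map_congr_left
  intro s hs
  rw [hgetD s hs, pvColOf_eq]
  congr 1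
  rw [PySem.List.pyGetD_natCast]
  simp [List.getD, hi']

-- ===== VERDICT (by name: the statement is the Claim_ definition above) =====
theorem create_count_spec : Claim_equal_create_count := by
  intro last_column _
  show create_count last_column = create_count_alt last_column
  rw [pvA_eq, pvB_eq]
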